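-- pv_equiv track=rewrite | github.com/Schromeo/CodingStepByStep | OAPrepare/CS/obstacles_on_number_line.py | solution
-- ===== SOURCE A (Python) =====
-- import bisect
--
-- def solution(ops):
--     obstacles = []
--     result = []
--
--     for op in ops:
--         if op[0] == 1:
--             # 类型1： 建造障碍物
--             x = op[1]
--             bisect.insort(obstacles, x)
--         elif op[0] == 2:
--             x, size = op[1], op[2]
--             left = x - size
--             right = x - 1
--             index_l = bisect.bisect_left(obstacles, left)
--             index_r = bisect.bisect_right(obstacles, right)
--             if index_l < index_r:
--                 result.append('0')
--             else:
--                 result.append('1')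
--     return "".join(result)
-- ===== SOURCE B (Python) =====
-- def solution(ops):
--     return "".join(
--         '0' if any(p[0] == 1 and op[1] - op[2] <= p[1] <= op[1] - 1 for p in ops[:i]) else '1'
--         for i, op in enumerate(ops) if op[0] == 2)
-- ===== Notes on version B (the rewrite author's own statement) =====
-- stated objective: simpler
-- what changed: B is a stateless one-expression prefix scan: each query re-scans the prefix of ops before it for a type-1 build whose coordinate lies in [x-size, x-1], instead of maintaining a sorted obstacle list via bisect.insort and answering with two binary searches.
import Mathlib
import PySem

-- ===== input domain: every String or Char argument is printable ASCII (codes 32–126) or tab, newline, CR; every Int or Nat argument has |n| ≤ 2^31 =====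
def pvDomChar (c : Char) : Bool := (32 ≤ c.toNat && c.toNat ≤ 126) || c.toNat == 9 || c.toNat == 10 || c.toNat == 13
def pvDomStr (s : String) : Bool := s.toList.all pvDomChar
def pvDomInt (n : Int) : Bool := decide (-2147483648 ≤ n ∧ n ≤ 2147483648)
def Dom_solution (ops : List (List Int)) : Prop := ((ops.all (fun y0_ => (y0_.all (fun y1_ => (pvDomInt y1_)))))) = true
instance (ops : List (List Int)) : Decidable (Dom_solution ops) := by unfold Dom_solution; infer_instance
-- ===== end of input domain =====

-- B replaces A's stateful sorted-list-with-bisect loop by a stateless prefix scan: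
-- each query re-scans the ops before it for a type-1 build in range (objective: simpler).

-- ===== PORT A =====
def solutionStepA (st : List Int × List String) (op : List Int) : List Int × List String :=
  if PySem.List.pyGetD op 0 0 = 1 then
    let x := PySem.List.pyGetD op 1 0
    (PySem.List.insert st.1 ((PySem.List.bisectRight st.1 x : Nat) : Int) x, st.2)
  else if PySem.List.pyGetD op 0 0 = 2 then
    let x := PySem.List.pyGetD op 1 0
    let size := PySem.List.pyGetD op 2 0
    let left := x - size
    let right := x - 1
    if PySem.List.bisectLeft st.1 left < PySem.List.bisectRight st.1 right then
      (st.1, st.2 ++ ["0"])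
    else
      (st.1, st.2 ++ ["1"])
  else st

def solution (ops : List (List Int)) : String :=
  PySem.Str.join "" (ops.foldl solutionStepA ([], [])).2

-- ===== PORT B =====
-- one enumerated query: op with op[0]==2 answers by scanning the slice ops[:i]
def solutionQueryB (ops : List (List Int)) (iop : Int × List Int) : Option String :=
  if PySem.List.pyGetD iop.2 0 0 = 2 then
    some (if (PySem.List.slice ops none (some iop.1)).any (fun p =>
        (PySem.List.pyGetD p 0 0 == 1)
          && decide (PySem.List.pyGetD iop.2 1 0 - PySem.List.pyGetD iop.2 2 0 ≤ PySem.List.pyGetD p 1 0)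
          && decide (PySem.List.pyGetD p 1 0 ≤ PySem.List.pyGetD iop.2 1 0 - 1))
      then "0" else "1")
  else none

def solution_alt (ops : List (List Int)) : String :=
  PySem.Str.join "" ((PySem.List.enumerate ops).filterMap (solutionQueryB ops))

-- ===== PRECONDITION & SPEC =====
-- Pre_ excludes only the inputs on which the Python A raises IndexError: an op list too
-- short for its opcode (op[0], op[1] or op[2] missing).
def Pre_solution (ops : List (List Int)) : Prop :=
  ∀ op ∈ ops, op ≠ [] ∧ (op.headI = 1 → 2 ≤ op.length) ∧ (op.headI = 2 → 3 ≤ op.length)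
instance (ops : List (List Int)) : Decidable (Pre_solution ops) := by unfold Pre_solution; infer_instance
def pvWitness_solution : List (List Int) := [[1, 5], [2, 6, 3], [2, 1, 1], [1, 0], [2, 1, 4]]

def Spec_solution (ops : List (List Int)) (out : String) : Prop := out = solution_alt ops
instance (ops : List (List Int)) (out : String) : Decidable (Spec_solution ops out) := by unfold Spec_solution; infer_instance

-- ===== CLAIM (what is proved, stated in full; the proofs are below) =====
def Claim_equal_solution : Prop := ∀ (ops : List (List Int)), Dom_solution ops → Pre_solution ops → Spec_solution ops (solution ops)

-- ===== LEMMAS AND PROOFS =====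

-- bisect.insort keeps the list sorted and adds exactly x to its members
theorem pv_insort_sorted (l : List Int) (x : Int) (h : l.Pairwise (· ≤ ·)) :
    (PySem.List.insert l ((PySem.List.bisectRight l x : Nat) : Int) x).Pairwise (· ≤ ·) := by
  obtain ⟨hle, hlt, hgt⟩ := PySem.List.bisectRight_spec l x h
  rw [PySem.List.insert_natCast l _ x hle]
  refine (List.pairwise_append).2 ⟨h.take, ?_, ?_⟩
  · constructor
    · intro b hb
      obtain ⟨j, hj, rfl⟩ := List.getElem_of_mem hb
      have hj' := hj
      rw [List.length_drop] at hj'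
      rw [List.getElem_drop]
      exact le_of_lt (hgt _ (by omega) (by omega))
    · exact h.drop
  · intro a ha b hb
    obtain ⟨j, hj, rfl⟩ := List.getElem_of_mem ha
    have hj' := hj
    rw [List.length_take] at hj'
    rw [List.getElem_take]
    have hax : l[j]'(by omega) ≤ x := hlt _ (by omega) (by omega)
    rcases List.mem_cons.1 hb with rfl | hb'
    · exact hax
    · obtain ⟨k, hk, rfl⟩ := List.getElem_of_mem hb'
      have hk' := hk
      rw [List.length_drop] at hk'
      rw [List.getElem_drop]
      exact le_trans hax (le_of_lt (hgt _ (by omega) (by omega)))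

theorem pv_insort_mem (l : List Int) (x y : Int) (h : l.Pairwise (· ≤ ·)) :
    y ∈ PySem.List.insert l ((PySem.List.bisectRight l x : Nat) : Int) x ↔ y ∈ l ∨ y = x := by
  obtain ⟨hle, -, -⟩ := PySem.List.bisectRight_spec l x h
  rw [PySem.List.insert_natCast l _ x hle]
  have hsplit := List.take_append_drop (PySem.List.bisectRight l x) l
  constructor
  · intro hy
    rcases List.mem_append.1 hy with h1 | h2
    · exact Or.inl (List.mem_of_mem_take h1)
    · rcases List.mem_cons.1 h2 with rfl | h3
      · exact Or.inr rfl
      · exact Or.inl (List.mem_of_mem_drop h3)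
  · intro hy
    rcases hy with hy | rfl
    · rw [← hsplit] at hy
      rcases List.mem_append.1 hy with h1 | h2
      · exact List.mem_append.2 (Or.inl h1)
      · exact List.mem_append.2 (Or.inr (List.mem_cons_of_mem _ h2))
    · exact List.mem_append.2 (Or.inr (List.mem_cons_self))

-- the query: bisect window nonempty ↔ some obstacle lies in [a, b]
theorem pv_query_iff (l : List Int) (h : l.Pairwise (· ≤ ·)) (a b : Int) :
    PySem.List.bisectLeft l a < PySem.List.bisectRight l b ↔ ∃ o ∈ l, a ≤ o ∧ o ≤ b := by
  obtain ⟨hle, hllt, hlge⟩ := PySem.List.bisectLeft_spec l a h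
  obtain ⟨hre, hrle, hrgt⟩ := PySem.List.bisectRight_spec l b h
  constructor
  · intro hlt
    have hi : PySem.List.bisectLeft l a < l.length := by omega
    exact ⟨l[PySem.List.bisectLeft l a], List.getElem_mem hi,
      hlge _ hi le_rfl, hrle _ hi hlt⟩
  · rintro ⟨o, ho, hao, hob⟩
    obtain ⟨j, hj, rfl⟩ := List.getElem_of_mem ho
    by_contra hc
    rw [not_lt] at hc
    by_cases h1 : j < PySem.List.bisectLeft l a
    · exact absurd (hllt _ hj h1) (by omega)
    · have : PySem.List.bisectRight l b ≤ j := by omega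
      exact absurd (hrgt _ hj this) (by omega)

-- the loop invariant: A's sorted obstacle list holds exactly the type-1 values of the
-- prefix B's queries re-scan; induction over the remaining ops, prefix as accumulator
theorem pv_loop (rest : List (List Int)) :
    ∀ (pre : List (List Int)) (la : List Int) (res : List String),
      la.Pairwise (· ≤ ·) →
      (∀ z : Int, z ∈ la ↔ ∃ p ∈ pre, PySem.List.pyGetD p 0 0 = 1 ∧ PySem.List.pyGetD p 1 0 = z) →
      (rest.foldl solutionStepA (la, res)).2
        = res ++ (PySem.List.enumerate rest (pre.length : Int)).filterMap (solutionQueryB (pre ++ rest)) := by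
  induction rest with
  | nil => intro pre la res _ _; simp [PySem.List.enumerate_nil]
  | cons op rest ih =>
    intro pre la res hsort hmem
    rw [PySem.List.enumerate_cons, List.filterMap_cons, List.foldl_cons]
    have hpre : pre ++ op :: rest = (pre ++ [op]) ++ rest := by simp
    have hlen : ((pre ++ [op]).length : Int) = (pre.length : Int) + 1 := by simp
    have hslice : PySem.List.slice (pre ++ op :: rest) none (some (pre.length : Int)) = pre := by
      rw [PySem.List.slice_to_natCast]
      exact List.take_left
    by_cases h1 : PySem.List.pyGetD op 0 0 = 1
    · have h2 : ¬ PySem.List.pyGetD op 0 0 = 2 := by rw [h1]; decide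
      simp only [solutionStepA, solutionQueryB, h1]
      rw [if_neg (by decide : ¬ ((1:Int) = 2))]
      simp only [reduceIte]
      rw [hpre, ← hlen]
      exact ih (pre ++ [op]) _ _ (pv_insort_sorted la _ hsort)
        (fun z => by
          rw [pv_insort_mem la _ z hsort, hmem z]
          constructor
          · rintro (⟨p, hp, hp1, hp2⟩ | rfl)
            · exact ⟨p, by simp [hp], hp1, hp2⟩
            · exact ⟨op, by simp, h1, rfl⟩
          · rintro ⟨p, hp, hp1, hp2⟩
            rcases List.mem_append.1 hp with hp' | hp'
            · exact Or.inl ⟨p, hp', hp1, hp2⟩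
            · rcases List.mem_singleton.1 hp' with rfl
              exact Or.inr hp2.symm)
    · by_cases h2 : PySem.List.pyGetD op 0 0 = 2
      · simp only [solutionStepA, solutionQueryB, h2, hslice]
        rw [if_neg (by decide : ¬ ((2:Int) = 1))]
        simp only [reduceIte]
        have hq : (PySem.List.bisectLeft la (PySem.List.pyGetD op 1 0 - PySem.List.pyGetD op 2 0)
              < PySem.List.bisectRight la (PySem.List.pyGetD op 1 0 - 1))
            ↔ (pre.any (fun p =>
                (PySem.List.pyGetD p 0 0 == 1)
                  && decide (PySem.List.pyGetD op 1 0 - PySem.List.pyGetD op 2 0 ≤ PySem.List.pyGetD p 1 0)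
                  && decide (PySem.List.pyGetD p 1 0 ≤ PySem.List.pyGetD op 1 0 - 1)) = true) := by
          rw [pv_query_iff la hsort, List.any_eq_true]
          constructor
          · rintro ⟨o, ho, h3, h4⟩
            obtain ⟨p, hp, hp1, hp2⟩ := (hmem o).1 ho
            exact ⟨p, hp, by simp [hp1, hp2, h3, h4]⟩
          · rintro ⟨p, hp, hdec⟩
            simp only [Bool.and_eq_true, beq_iff_eq, decide_eq_true_eq] at hdec
            exact ⟨PySem.List.pyGetD p 1 0, (hmem _).2 ⟨p, hp, hdec.1.1, rfl⟩, hdec.1.2, hdec.2⟩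
        by_cases hb : PySem.List.bisectLeft la (PySem.List.pyGetD op 1 0 - PySem.List.pyGetD op 2 0)
            < PySem.List.bisectRight la (PySem.List.pyGetD op 1 0 - 1)
        · rw [if_pos hb, if_pos (hq.1 hb), hpre, ← hlen,
            ih (pre ++ [op]) la (res ++ ["0"]) hsort
              (fun z => by
                rw [hmem z]
                constructor
                · rintro ⟨p, hp, hp1, hp2⟩; exact ⟨p, by simp [hp], hp1, hp2⟩
                · rintro ⟨p, hp, hp1, hp2⟩
                  rcases List.mem_append.1 hp with hp' | hp'
                  · exact ⟨p, hp', hp1, hp2⟩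
                  · rcases List.mem_singleton.1 hp' with rfl; exact absurd hp1 h1),
            List.append_assoc]
          rfl
        · rw [if_neg hb, if_neg (fun hc => hb (hq.2 hc)), hpre, ← hlen,
            ih (pre ++ [op]) la (res ++ ["1"]) hsort
              (fun z => by
                rw [hmem z]
                constructor
                · rintro ⟨p, hp, hp1, hp2⟩; exact ⟨p, by simp [hp], hp1, hp2⟩
                · rintro ⟨p, hp, hp1, hp2⟩
                  rcases List.mem_append.1 hp with hp' | hp'
                  · exact ⟨p, hp', hp1, hp2⟩
                  · rcases List.mem_singleton.1 hp' with rfl; exact absurd hp1 h1),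
            List.append_assoc]
          rfl
      · simp only [solutionStepA, solutionQueryB, if_neg h1, if_neg h2]
        rw [hpre, ← hlen]
        exact ih (pre ++ [op]) la res hsort
          (fun z => by
            rw [hmem z]
            constructor
            · rintro ⟨p, hp, hp1, hp2⟩; exact ⟨p, by simp [hp], hp1, hp2⟩
            · rintro ⟨p, hp, hp1, hp2⟩
              rcases List.mem_append.1 hp with hp' | hp'
              · exact ⟨p, hp', hp1, hp2⟩
              · rcases List.mem_singleton.1 hp' with rfl; exact absurd hp1 h1)

-- ===== VERDICT (by name: the statement is the Claim_ definition above) =====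
theorem solution_spec : Claim_equal_solution := by
  intro ops _ _
  unfold Spec_solution solution solution_alt
  have h := pv_loop ops [] [] [] List.Pairwise.nil (fun z => by simp)
  simp only [List.nil_append, List.length_nil, Nat.cast_zero] at h
  rw [h]
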